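-- pv_equiv track=rewrite | github.com/tlensk/HMM | hmmout_parse_lib.py | HighlightAlign
-- ===== SOURCE A (Python) =====
-- def HighlightAlign(seq, st, fn):
--     # This snippet highlights the aligned part of the sequence
--     n = len(seq)
--     st = st-1
--     fn= fn-1
--
--     s = ""
--     for i in range(n):
--         if (i <= st) or (i >= fn):
--             s = s+"."
--         else:
--             s = s+seq[i]
--     return s
-- ===== SOURCE B (Python) =====
-- def HighlightAlign(seq, st, fn):
--     # closed form: leading dots, the untouched aligned slice, trailing dots
--     n = len(seq)
--     a = min(max(st, 0), n)
--     b = min(max(fn - 1, 0), n)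
--     if b < a:
--         b = a
--     return "." * a + seq[a:b] + "." * (n - b)
-- ===== Notes on version B (the rewrite author's own statement) =====
-- stated objective: simpler
-- what changed: Replaces the per-character loop with repeated string concatenation by a closed-form result: leading dots, one clamped slice for the aligned region, trailing dots.
import Mathlib
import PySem

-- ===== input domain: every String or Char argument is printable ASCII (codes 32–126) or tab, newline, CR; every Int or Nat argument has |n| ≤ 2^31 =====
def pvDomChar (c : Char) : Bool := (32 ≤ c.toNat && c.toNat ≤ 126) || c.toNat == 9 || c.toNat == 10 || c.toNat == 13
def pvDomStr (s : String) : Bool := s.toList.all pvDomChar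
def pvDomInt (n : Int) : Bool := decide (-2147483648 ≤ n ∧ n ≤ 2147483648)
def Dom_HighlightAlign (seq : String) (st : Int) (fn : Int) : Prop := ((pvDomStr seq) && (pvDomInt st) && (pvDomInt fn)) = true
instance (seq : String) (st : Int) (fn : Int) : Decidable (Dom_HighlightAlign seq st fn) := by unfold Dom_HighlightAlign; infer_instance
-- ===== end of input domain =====

-- B replaces A's per-character loop by a closed-form concatenation (dots + one clamped slice + dots); objective: simpler.

-- ===== PORT A =====
-- per-character loop: dot when i <= st-1 or i >= fn-1, else the character.
-- seq[i] with 0 ≤ i < len(seq) is always in range, so getD is exact here.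
def HighlightAlign (seq : String) (st : Int) (fn : Int) : String :=
  let cs := seq.toList
  let n := cs.length
  let st' := st - 1
  let fn' := fn - 1
  String.ofList ((List.range n).foldl
    (fun (s : List Char) (i : Nat) => if (i : Int) ≤ st' ∨ fn' ≤ (i : Int) then s ++ ['.'] else s ++ [cs.getD i ' ']) [])

-- ===== PORT B =====
-- "."*a + seq[a:b] + "."*(n-b) with a,b clamped to [0,n] and b := max b a;
-- the clamped slice seq[a:b] (0 ≤ a ≤ b ≤ n) is exactly drop/take.
def HighlightAlign_alt (seq : String) (st : Int) (fn : Int) : String :=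
  let cs := seq.toList
  let n := cs.length
  let a := (min (max st 0) (n : Int)).toNat
  let b0 := (min (max (fn - 1) 0) (n : Int)).toNat
  let b := max b0 a
  String.ofList (List.replicate a '.' ++ (cs.drop a).take (b - a) ++ List.replicate (n - b) '.')

-- ===== PRECONDITION & SPEC =====
def Spec_HighlightAlign (seq : String) (st : Int) (fn : Int) (out : String) : Prop := out = HighlightAlign_alt seq st fn
instance (seq : String) (st : Int) (fn : Int) (out : String) : Decidable (Spec_HighlightAlign seq st fn out) := by unfold Spec_HighlightAlign; infer_instance

-- ===== CLAIM (what is proved, stated in full; the proofs are below) =====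
def Claim_equal_HighlightAlign : Prop := ∀ (seq : String) (st : Int) (fn : Int), Dom_HighlightAlign seq st fn → Spec_HighlightAlign seq st fn (HighlightAlign seq st fn)

-- ===== LEMMAS AND PROOFS =====

-- the masked string, position by position, equals dots ++ slice ++ dots
lemma highlight_key (cs : List Char) (st fn : Int) (a b : Nat)
    (ha : (a : Int) = min (max st 0) (cs.length : Int))
    (hb : (b : Int) = max (min (max (fn - 1) 0) (cs.length : Int)) (a : Int)) :
    (List.range cs.length).map
        (fun (i : Nat) => if (i : Int) ≤ st - 1 ∨ fn - 1 ≤ (i : Int) then '.' else cs.getD i ' ')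
      = List.replicate a '.' ++ (cs.drop a).take (b - a) ++ List.replicate (cs.length - b) '.' := by
  have han : a ≤ cs.length := by omega
  have hbn : b ≤ cs.length := by omega
  have hab : a ≤ b := by omega
  have hmid : ((cs.drop a).take (b - a)).length = b - a := by
    simp [List.length_take, List.length_drop]; omega
  apply List.ext_getElem
  · simp only [List.length_map, List.length_range, List.length_append,
      List.length_replicate, hmid]
    omega
  · intro i h1 h2
    simp only [List.length_map, List.length_range] at h1
    simp only [List.getElem_map, List.getElem_range, List.getElem_append,
      List.length_append, List.length_replicate, hmid, List.getElem_replicate,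
      List.getElem_take, List.getElem_drop]
    split_ifs <;>
      first
        | rfl
        | omega
        | (rw [List.getD_eq_getElem cs ' ' h1]; congr 1; omega)

-- ===== VERDICT (by name: the statement is the Claim_ definition above) =====
theorem HighlightAlign_spec : Claim_equal_HighlightAlign := by
  intro seq st fn _
  unfold Spec_HighlightAlign HighlightAlign HighlightAlign_alt
  simp only []
  have hcongr :
      List.foldl
        (fun (s : List Char) (i : Nat) =>
          if (i : Int) ≤ st - 1 ∨ fn - 1 ≤ (i : Int) then s ++ ['.'] else s ++ [seq.toList.getD i ' '])
        [] (List.range seq.toList.length)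
      = List.foldl
        (fun (s : List Char) (i : Nat) =>
          s ++ [if (i : Int) ≤ st - 1 ∨ fn - 1 ≤ (i : Int) then '.' else seq.toList.getD i ' '])
        [] (List.range seq.toList.length) := by
    apply PySem.List.foldl_congr_mem
    intro acc x _
    split_ifs <;> rfl
  rw [hcongr, PySem.List.foldl_append_singleton_eq_map]
  congr 1
  simp only [List.nil_append]
  exact highlight_key seq.toList st fn _ _ (by omega) (by omega)
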